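-- pv_equiv track=rewrite | github.com/AaronPlave/newspun | newspun/lib/algorithms/proximate.py | proximity
-- ===== SOURCE A (Python) =====
-- def proximity(text, word1, word2):
-- 	count = 0
-- 	onealone = 0
-- 	twoalone = 0
-- 	sentences = text.split('.')
-- 	for line in sentences:
-- 		words = line.split(None)
-- 		if word1 in words:
-- 			onealone += 1
-- 		if word2 in words:
-- 			twoalone += 1
-- 		if (word1 in words) and (word2 in words):
-- 			count += 1
-- 	return (onealone, twoalone, count)
-- ===== SOURCE B (Python) =====
-- def proximity(text, word1, word2):
--     index = {}
--     for i, line in enumerate(text.split('.')):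
--         for w in line.split():
--             index.setdefault(w, set()).add(i)
--     s1 = index.get(word1, set())
--     s2 = index.get(word2, set())
--     return (len(s1), len(s2), len(s1 & s2))
-- ===== Notes on version B (the rewrite author's own statement) =====
-- stated objective: alternative
-- what changed: Replaces A's per-sentence membership tests with an inverted index: one pass over all tokens builds a dict mapping each word to the set of sentence indices containing it, then the three counts are the sizes of the two index sets and of their intersection.
import Mathlib
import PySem

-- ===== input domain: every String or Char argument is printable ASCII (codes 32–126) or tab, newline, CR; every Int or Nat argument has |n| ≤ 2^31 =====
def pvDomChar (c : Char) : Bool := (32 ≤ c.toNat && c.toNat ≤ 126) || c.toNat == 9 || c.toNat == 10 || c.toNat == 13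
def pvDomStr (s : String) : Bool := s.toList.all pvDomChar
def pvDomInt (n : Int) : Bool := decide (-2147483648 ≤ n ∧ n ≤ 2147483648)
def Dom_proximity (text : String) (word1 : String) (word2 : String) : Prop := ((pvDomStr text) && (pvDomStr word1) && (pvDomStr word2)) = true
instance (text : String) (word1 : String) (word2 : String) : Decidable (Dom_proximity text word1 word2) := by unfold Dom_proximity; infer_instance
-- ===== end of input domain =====

-- B replaces A's three per-sentence membership counters with an inverted index
-- (word -> set of sentence indices) built in one pass over the tokens; the three
-- counts are set sizes and an intersection size (alternative algorithm, same cost).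

-- ===== PORT A =====
-- A: one pass over the sentences, accumulating (count, onealone, twoalone) in order.
def proximity (text : String) (word1 : String) (word2 : String) : Int × Int × Int :=
  let sentences := (PySem.Str.split? text ".").getD []
  let st := sentences.foldl (fun (st : Int × Int × Int) line =>
    let words := PySem.Str.split₀ line
    let onealone := if words.contains word1 then st.2.1 + 1 else st.2.1
    let twoalone := if words.contains word2 then st.2.2 + 1 else st.2.2
    let count := if words.contains word1 && words.contains word2 then st.1 + 1 else st.1
    (count, onealone, twoalone)) (0, 0, 0)
  (st.2.1, st.2.2, st.1)

-- ===== PORT B =====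
-- B: build the inverted index word -> set of sentence indices, then read off
-- the two set sizes and the size of their intersection.
def proximity_alt (text : String) (word1 : String) (word2 : String) : Int × Int × Int :=
  let index := (PySem.List.enumerate ((PySem.Str.split? text ".").getD []) 0).foldl
    (fun (d : PySem.Dict String (PySem.Set Int)) p =>
      (PySem.Str.split₀ p.2).foldl
        (fun d w => d.modify w PySem.Set.empty (fun s => PySem.Set.add s p.1)) d)
    PySem.Dict.empty
  let s1 := index.getD word1 PySem.Set.empty
  let s2 := index.getD word2 PySem.Set.empty
  (PySem.Set.len s1, PySem.Set.len s2, PySem.Set.len (PySem.Set.inter s1 s2))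

-- ===== PRECONDITION & SPEC =====
def Spec_proximity (text : String) (word1 : String) (word2 : String) (out : Int × Int × Int) : Prop := out = proximity_alt text word1 word2
instance (text : String) (word1 : String) (word2 : String) (out : Int × Int × Int) : Decidable (Spec_proximity text word1 word2 out) := by unfold Spec_proximity; infer_instance

-- ===== CLAIM =====
def Claim_equal_proximity : Prop := ∀ (text : String) (word1 : String) (word2 : String), Dom_proximity text word1 word2 → Spec_proximity text word1 word2 (proximity text word1 word2)

-- ===== LEMMAS AND PROOFS =====

-- indices (counted from n) of the sentences in ls whose word list contains w
def idxList (w : String) : List String → Int → List Int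
  | [], _ => []
  | l :: ls, n => (if (PySem.Str.split₀ l).contains w then [n] else []) ++ idxList w ls (n + 1)

theorem set_add_fresh (s : PySem.Set Int) (i : Int) (h : i ∉ s) :
    PySem.Set.add s i = s ++ [i] := by
  simp [PySem.Set.add, PySem.Set.contains]
  intro hc; exact absurd hc h

-- Inner loop over the words of one sentence: for each key w, the entry gains i
-- exactly when w occurs among the words (duplicate occurrences collapse).
theorem inner_getD (ws : List String) (i : Int) (d : PySem.Dict String (PySem.Set Int)) (w : String) :
    ((ws.foldl (fun d v => d.modify v PySem.Set.empty (fun s => PySem.Set.add s i)) d).getD w PySem.Set.empty)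
      = if ws.contains w then PySem.Set.add (d.getD w PySem.Set.empty) i else d.getD w PySem.Set.empty := by
  induction ws generalizing d with
  | nil => simp
  | cons v ws ih =>
    simp only [List.foldl_cons, ih, PySem.Dict.getD_modify]
    by_cases hv : w = v <;> by_cases hm : ws.contains w <;>
      simp_all [eq_comm]

-- Outer loop over the enumerated sentences: starting from a dict whose entry at w
-- only holds indices below n, the entry at w ends as that list plus idxList w ls n.
theorem build_getD (ls : List String) (n : Int) (d : PySem.Dict String (PySem.Set Int)) (w : String)
    (hs : ∀ x ∈ d.getD w PySem.Set.empty, x < n) :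
    (((PySem.List.enumerate ls n).foldl
      (fun (d : PySem.Dict String (PySem.Set Int)) p =>
        (PySem.Str.split₀ p.2).foldl
          (fun d w => d.modify w PySem.Set.empty (fun s => PySem.Set.add s p.1)) d) d).getD w PySem.Set.empty)
      = d.getD w PySem.Set.empty ++ idxList w ls n := by
  induction ls generalizing n d with
  | nil => simp [PySem.List.enumerate, idxList]
  | cons l ls ih =>
    rw [PySem.List.enumerate_cons, List.foldl_cons]
    have hfresh : n ∉ d.getD w PySem.Set.empty := fun hmem => absurd (hs n hmem) (by omega)
    have hstep := inner_getD (PySem.Str.split₀ l) n d w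
    by_cases hc : (PySem.Str.split₀ l).contains w
    · rw [ih (n + 1) _ (by
        rw [hstep, if_pos hc, set_add_fresh _ _ hfresh]
        intro x hx
        rcases List.mem_append.mp hx with h | h
        · exact lt_trans (hs x h) (by omega)
        · simp at h; omega)]
      rw [hstep, if_pos hc, set_add_fresh _ _ hfresh, idxList, if_pos hc]
      simp
    · rw [ih (n + 1) _ (fun x hx => by rw [hstep, if_neg hc] at hx; exact lt_trans (hs x hx) (by omega))]
      rw [hstep, if_neg hc, idxList, if_neg hc]
      simp

theorem idxList_length (w : String) (ls : List String) (n : Int) :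
    (idxList w ls n).length = ls.countP (fun l => (PySem.Str.split₀ l).contains w) := by
  induction ls generalizing n with
  | nil => simp [idxList]
  | cons l ls ih =>
    simp only [idxList, List.length_append, List.countP_cons, ih]
    split_ifs <;> simp_all <;> omega

theorem idxList_lb (w : String) (ls : List String) (n : Int) (x : Int) (hx : x ∈ idxList w ls n) : n ≤ x := by
  induction ls generalizing n with
  | nil => simp [idxList] at hx
  | cons l ls ih =>
    simp only [idxList, List.mem_append] at hx
    rcases hx with h | h
    · split_ifs at h <;> simp_all
    · have := ih (n + 1) h; omega

theorem idxList_inter_length (w1 w2 : String) (ls : List String) (n : Int) :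
    (PySem.Set.inter (idxList w1 ls n) (idxList w2 ls n)).length
      = ls.countP (fun l => (PySem.Str.split₀ l).contains w1 && (PySem.Str.split₀ l).contains w2) := by
  induction ls generalizing n with
  | nil => simp [idxList, PySem.Set.inter]
  | cons l ls ih =>
    simp only [idxList, PySem.Set.inter, List.filter_append, List.length_append, List.countP_cons]
    have htail2 : ∀ x : Int, x ∈ idxList w2 ls (n + 1) → x ≠ n := by
      intro x hx hxe; have := idxList_lb w2 ls (n + 1) x hx; omega
    have hcong : (idxList w1 ls (n + 1)).filter
          (fun x => PySem.Set.contains ((if (PySem.Str.split₀ l).contains w2 then [n] else []) ++ idxList w2 ls (n + 1) : PySem.Set Int) x)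
        = (idxList w1 ls (n + 1)).filter (fun x => PySem.Set.contains (idxList w2 ls (n + 1) : PySem.Set Int) x) := by
      apply List.filter_congr
      intro x hx
      have hxn : x ≠ n := fun hxe => by
        have := idxList_lb w1 ls (n + 1) x hx; omega
      simp only [PySem.Set.contains, List.contains_iff_mem]
      by_cases hc2 : (PySem.Str.split₀ l).contains w2 <;> simp [hxn]
    rw [hcong]
    have hhead : ((if (PySem.Str.split₀ l).contains w1 then [n] else []).filter
          (fun x => PySem.Set.contains ((if (PySem.Str.split₀ l).contains w2 then [n] else []) ++ idxList w2 ls (n + 1) : PySem.Set Int) x)).length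
        = if (PySem.Str.split₀ l).contains w1 && (PySem.Str.split₀ l).contains w2 then 1 else 0 := by
      have hnn : n ∉ idxList w2 ls (n + 1) := fun hx => htail2 n hx rfl
      by_cases hc1 : w1 ∈ PySem.Str.split₀ l <;> by_cases hc2 : w2 ∈ PySem.Str.split₀ l <;>
        simp [hc1, hc2, hnn]
    rw [hhead]
    have hfold : (List.filter (fun x => PySem.Set.contains (idxList w2 ls (n + 1)) x) (idxList w1 ls (n + 1)))
        = PySem.Set.inter (idxList w1 ls (n + 1)) (idxList w2 ls (n + 1)) := rfl
    rw [hfold, ih (n + 1)]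
    omega

-- A's fold adds, to each starting counter, the corresponding count over the list.
theorem proximity_fold_eq (word1 word2 : String) (ls : List String) (c o t : Int) :
    ls.foldl (fun (st : Int × Int × Int) line =>
      let words := PySem.Str.split₀ line
      let onealone := if words.contains word1 then st.2.1 + 1 else st.2.1
      let twoalone := if words.contains word2 then st.2.2 + 1 else st.2.2
      let count := if words.contains word1 && words.contains word2 then st.1 + 1 else st.1
      (count, onealone, twoalone)) (c, o, t)
    = (c + (ls.countP (fun l => (PySem.Str.split₀ l).contains word1 && (PySem.Str.split₀ l).contains word2) : Int),
       o + (ls.countP (fun l => (PySem.Str.split₀ l).contains word1) : Int),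
       t + (ls.countP (fun l => (PySem.Str.split₀ l).contains word2) : Int)) := by
  induction ls generalizing c o t with
  | nil => simp
  | cons hd tl ih =>
    simp only [List.foldl_cons, List.countP_cons, ih]
    split_ifs <;> simp_all [Prod.ext_iff] <;> omega

-- ===== VERDICT =====
theorem proximity_spec : Claim_equal_proximity := by
  intro text word1 word2 _
  unfold Spec_proximity proximity proximity_alt
  simp only [proximity_fold_eq]
  have h1 := build_getD ((PySem.Str.split? text ".").getD []) 0 PySem.Dict.empty word1 (by simp [PySem.Dict.getD_empty, PySem.Set.empty])
  have h2 := build_getD ((PySem.Str.split? text ".").getD []) 0 PySem.Dict.empty word2 (by simp [PySem.Dict.getD_empty, PySem.Set.empty])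
  simp only [PySem.Dict.getD_empty, PySem.Set.empty, List.nil_append] at h1 h2
  simp only [PySem.Set.empty]
  simp only [h1, h2, PySem.Set.len, idxList_length, idxList_inter_length]
  simp
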